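-- pv_equiv track=rewrite | github.com/RichWolff/joplin_sync | joplin_note_cli.py | serialize_note
-- ===== SOURCE A (Python) =====
-- from typing import Dict, Tuple
--
-- META_ORDER = [
--     "id",
--     "parent_id",
--     "created_time",
--     "updated_time",
--     "is_conflict",
--     "latitude",
--     "longitude",
--     "altitude",
--     "author",
--     "source_url",
--     "is_todo",
--     "todo_due",
--     "todo_completed",
--     "source",
--     "source_application",
--     "application_data",
--     "order",
--     "user_created_time",
--     "user_updated_time",
--     "encryption_cipher_text",
--     "encryption_applied",
--     "markup_language",
--     "is_shared",
--     "share_id",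
--     "conflict_original_id",
--     "master_key_id",
--     "user_data",
--     "deleted_time",
--     "type_",
-- ]
--
-- def serialize_note(title: str, body: str, metadata: Dict[str, str]) -> str:
--     meta = metadata.copy()
--     meta["type_"] = "1"
--
--     lines = [title, "", body, ""]
--     for key in META_ORDER:
--         if key in meta:
--             lines.append(f"{key}: {meta[key]}")
--
--     # Keep any extra metadata keys too.
--     extra = sorted(k for k in meta.keys() if k not in META_ORDER)
--     for key in extra:
--         lines.append(f"{key}: {meta[key]}")
--
--     return "\n".join(lines)
-- ===== SOURCE B (Python) =====
-- META_ORDER = [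
--     "id", "parent_id", "created_time", "updated_time", "is_conflict",
--     "latitude", "longitude", "altitude", "author", "source_url",
--     "is_todo", "todo_due", "todo_completed", "source", "source_application",
--     "application_data", "order", "user_created_time", "user_updated_time",
--     "encryption_cipher_text", "encryption_applied", "markup_language",
--     "is_shared", "share_id", "conflict_original_id", "master_key_id",
--     "user_data", "deleted_time", "type_",
-- ]
--
--
-- def serialize_note(title: str, body: str, metadata) -> str:
--     idx = {k: i for i, k in enumerate(META_ORDER)}
--     meta = dict(metadata)
--     meta["type_"] = "1"
--     keys = sorted(meta, key=lambda k: (idx.get(k, len(META_ORDER)), k))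
--     return "\n".join([title, "", body, ""] + [f"{k}: {meta[k]}" for k in keys])
-- ===== Notes on version B (the rewrite author's own statement) =====
-- stated objective: simpler
-- what changed: Replaces A's two output passes (an ordered scan over META_ORDER testing membership in the dict, then a separate sorted pass over the leftover keys) by one pass: a position index built once from META_ORDER and a single sort of all metadata keys by (position, key), formatted in one comprehension.
import Mathlib
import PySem

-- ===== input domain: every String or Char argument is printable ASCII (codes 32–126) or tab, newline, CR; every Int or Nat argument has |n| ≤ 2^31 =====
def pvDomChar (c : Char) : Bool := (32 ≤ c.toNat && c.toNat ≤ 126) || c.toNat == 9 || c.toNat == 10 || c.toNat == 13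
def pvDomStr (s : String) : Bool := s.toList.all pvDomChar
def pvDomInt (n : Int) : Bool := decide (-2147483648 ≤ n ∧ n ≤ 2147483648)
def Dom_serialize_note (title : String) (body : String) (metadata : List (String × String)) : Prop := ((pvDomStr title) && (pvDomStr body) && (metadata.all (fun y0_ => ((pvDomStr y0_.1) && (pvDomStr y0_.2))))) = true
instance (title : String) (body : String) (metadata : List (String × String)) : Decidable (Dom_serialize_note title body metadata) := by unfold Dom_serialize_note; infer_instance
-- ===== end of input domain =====

-- B replaces A's two output passes (ordered META_ORDER scan + separate sorted pass over the
-- leftover keys) by a single sort of all metadata keys under the key (position-in-META_ORDER, key);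
-- objective: simpler (one pass, no speed claim).

-- ===== PORT A =====
def META_ORDER : List String := [
  "id", "parent_id", "created_time", "updated_time", "is_conflict",
  "latitude", "longitude", "altitude", "author", "source_url",
  "is_todo", "todo_due", "todo_completed", "source", "source_application",
  "application_data", "order", "user_created_time", "user_updated_time",
  "encryption_cipher_text", "encryption_applied", "markup_language",
  "is_shared", "share_id", "conflict_original_id", "master_key_id",
  "user_data", "deleted_time", "type_"]

def serialize_note (title : String) (body : String) (metadata : List (String × String)) : String :=
  let m := (PySem.Dict.ofList metadata).insert "type_" "1"
  let lines := [title, "", body, ""]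
  -- for key in META_ORDER: if key in meta: lines.append(f"{key}: {meta[key]}")
  -- (meta[key] is looked up only under 'key in meta', so it never raises: getD is exact here)
  let lines := META_ORDER.foldl (fun acc key =>
      if m.contains key then acc ++ [key ++ ": " ++ m.getD key ""] else acc) lines
  -- extra = sorted(k for k in m.keys() if k not in META_ORDER)
  let extra := PySem.List.sorted (m.keys.filter (fun k => !META_ORDER.contains k)) (fun k => k) false
  let lines := extra.foldl (fun acc key => acc ++ [key ++ ": " ++ m.getD key ""]) lines
  PySem.Str.join "\n" lines

-- ===== PORT B =====
-- idx = {k: i for i, k in enumerate(META_ORDER)}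
def metaIdx : PySem.Dict String Int :=
  (PySem.List.enumerate META_ORDER 0).foldl (fun d p => d.insert p.2 p.1) PySem.Dict.empty

def serialize_note_alt (title : String) (body : String) (metadata : List (String × String)) : String :=
  let m := (PySem.Dict.ofList metadata).insert "type_" "1"
  -- keys = sorted(meta, key=lambda k: (idx.get(k, len(META_ORDER)), k))
  let keys := PySem.List.sorted2 m.keys
      (fun k => metaIdx.getD k (META_ORDER.length : Int)) (fun k => k) false
  PySem.Str.join "\n" ([title, "", body, ""] ++ keys.map (fun k => k ++ ": " ++ m.getD k ""))

-- ===== PRECONDITION & SPEC =====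
def Spec_serialize_note (title : String) (body : String) (metadata : List (String × String)) (out : String) : Prop := out = serialize_note_alt title body metadata
instance (title : String) (body : String) (metadata : List (String × String)) (out : String) : Decidable (Spec_serialize_note title body metadata out) := by unfold Spec_serialize_note; infer_instance

-- ===== CLAIM (what is proved, stated in full; the proofs are below) =====
def Claim_equal_serialize_note : Prop := ∀ (title : String) (body : String) (metadata : List (String × String)), Dom_serialize_note title body metadata → Spec_serialize_note title body metadata (serialize_note title body metadata)

-- ===== LEMMAS AND PROOFS =====

-- B's tuple-key sort is the sort under the lexicographic order on (Int, String).
theorem sorted2_eq_sorted_lex (xs : List String) (k1 : String → Int) :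
    PySem.List.sorted2 xs k1 (fun k => k) false
      = PySem.List.sorted xs (fun k => toLex (k1 k, k)) false := by
  simp only [PySem.List.sorted2, PySem.List.sorted]
  congr 1
  funext acc x
  congr 1
  funext a b
  rcases lt_trichotomy (k1 a) (k1 b) with h | h | h
  · simp [h, Prod.Lex.lt_iff]
  · simp [h, Prod.Lex.lt_iff]
  · have hne : k1 a ≠ k1 b := ne_of_gt h
    simp [not_lt_of_gt h, Prod.Lex.lt_iff, hne, not_le_of_gt h]

set_option maxRecDepth 40000 in
theorem metaIdx_lt_of_mem : ∀ k ∈ META_ORDER, metaIdx.getD k (META_ORDER.length : Int) < (META_ORDER.length : Int) := by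
  decide

set_option maxRecDepth 40000 in
theorem metaIdx_pairwise : META_ORDER.Pairwise
    (fun a b => metaIdx.getD a (META_ORDER.length : Int) < metaIdx.getD b (META_ORDER.length : Int)) := by
  decide

set_option maxRecDepth 40000 in
theorem metaIdx_keys : metaIdx.keys = META_ORDER := by decide

theorem metaIdx_of_not_mem (k : String) (h : k ∉ META_ORDER) :
    metaIdx.getD k (META_ORDER.length : Int) = (META_ORDER.length : Int) := by
  apply PySem.Dict.getD_of_not_contains
  rw [PySem.Dict.contains_eq_decide_mem_keys, metaIdx_keys]
  simpa using h

-- The single lex sort of the keys equals A's ordered scan followed by the sorted extras.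
theorem sorted_keys_split (d : PySem.Dict String String) (hnd : d.keys.Nodup) :
    PySem.List.sorted d.keys (fun k => toLex (metaIdx.getD k (META_ORDER.length : Int), k)) false
      = META_ORDER.filter (fun k => d.contains k)
        ++ PySem.List.sorted (d.keys.filter (fun k => !META_ORDER.contains k)) (fun k => k) false := by
  apply PySem.List.sorted_eq_of_perm_of_pairwise_lt
  · -- permutation of d.keys
    have hMnd : META_ORDER.Nodup := by decide
    have p1 : (META_ORDER.filter (fun k => d.contains k)).Perm
        (d.keys.filter (fun k => META_ORDER.contains k)) := by
      apply List.perm_of_nodup_nodup_toFinset_eq (hMnd.filter _) (hnd.filter _)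
      ext x
      simp [PySem.Dict.contains_eq_decide_mem_keys, and_comm]
    have p2 : (PySem.List.sorted (d.keys.filter (fun k => !META_ORDER.contains k)) (fun k => k) false).Perm
        (d.keys.filter (fun k => !META_ORDER.contains k)) :=
      PySem.List.sorted_perm _ _ _
    exact (p1.append p2).trans (List.filter_append_perm _ d.keys)
  · -- strictly increasing under the lex key
    rw [List.pairwise_append]
    refine ⟨?_, ?_, ?_⟩
    · exact (List.Pairwise.sublist List.filter_sublist metaIdx_pairwise).imp
        (fun h => Prod.Lex.lt_iff.mpr (Or.inl h))
    · have hse := PySem.List.sorted_pairwise (d.keys.filter (fun k => !META_ORDER.contains k)) (fun k => k)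
      have hsnd : (PySem.List.sorted (d.keys.filter (fun k => !META_ORDER.contains k)) (fun k => k) false).Nodup :=
        ((PySem.List.sorted_perm _ _ _).nodup_iff).mpr (hnd.filter _)
      refine (hse.and hsnd).imp_of_mem (fun {a b} ha hb hr => ?_)
      have hda := ((PySem.List.mem_sorted _ _ _ _).mp ha)
      have hdb := ((PySem.List.mem_sorted _ _ _ _).mp hb)
      have hna : a ∉ META_ORDER := by
        simpa [List.mem_filter, List.contains_iff_mem] using (List.mem_filter.mp hda).2
      have hnb : b ∉ META_ORDER := by
        simpa [List.mem_filter, List.contains_iff_mem] using (List.mem_filter.mp hdb).2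
      refine Prod.Lex.lt_iff.mpr (Or.inr ?_)
      refine ⟨by simp [metaIdx_of_not_mem _ hna, metaIdx_of_not_mem _ hnb], ?_⟩
      exact lt_of_le_of_ne hr.1 hr.2
    · intro a ha b hb
      have haM : a ∈ META_ORDER := (List.mem_filter.mp ha).1
      have hbn : b ∉ META_ORDER := by
        have := (List.mem_filter.mp ((PySem.List.mem_sorted _ _ _ _).mp hb)).2
        simpa [List.contains_iff_mem] using this
      refine Prod.Lex.lt_iff.mpr (Or.inl ?_)
      rw [metaIdx_of_not_mem _ hbn]
      exact metaIdx_lt_of_mem _ haM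

-- ===== VERDICT (by name: the statement is the Claim_ definition above) =====
theorem serialize_note_spec : Claim_equal_serialize_note := by
  intro title body metadata _
  unfold Spec_serialize_note
  have hnd : ((PySem.Dict.ofList metadata).insert "type_" "1").keys.Nodup :=
    PySem.Dict.nodup_keys_insert _ _ _ (PySem.Dict.nodup_keys_ofList metadata)
  simp only [serialize_note, serialize_note_alt, PySem.List.foldl_append_if,
    PySem.List.foldl_append_singleton_eq_map, sorted2_eq_sorted_lex]
  rw [sorted_keys_split _ hnd]
  simp [List.map_append]
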